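-- pv_equiv track=rewrite | github.com/zohebwaghu/Kayak---DATA-236-Final-Project | ai/utils/ai_helpers.py | filter_deals_by_tags
-- ===== SOURCE A (Python) =====
-- from typing import List, Dict, Any
--
-- def filter_deals_by_tags(
--     deals: List[Dict[str, Any]],
--     required_tags: List[str]
-- ) -> List[Dict[str, Any]]:
--     """
--     Filter deals by required tags
--
--     Args:
--         deals: List of deal dicts (must have 'tags' key)
--         required_tags: Tags that must be present
--
--     Returns:
--         List[dict]: Filtered deals
--     """
--     filtered = []
--     required_set = set(tag.lower() for tag in required_tags)
--
--     for deal in deals: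
--         deal_tags = set(tag.lower() for tag in deal.get("tags", []))
--         if required_set.issubset(deal_tags):
--             filtered.append(deal)
--
--     return filtered
-- ===== SOURCE B (Python) =====
-- from typing import List, Dict, Any
--
-- def filter_deals_by_tags(
--     deals: List[Dict[str, Any]],
--     required_tags: List[str]
-- ) -> List[Dict[str, Any]]:
--     # Inverted index: tag -> set of deal indices carrying that tag.
--     index = {}
--     for i, deal in enumerate(deals):
--         for tag in deal.get("tags", []):
--             t = tag.lower()
--             posting = index.get(t, set())
--             posting.add(i)
--             index[t] = posting
--     # Intersect posting sets along the (already sorted) list of all indices.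
--     surviving = list(range(len(deals)))
--     for tag in required_tags:
--         posting = index.get(tag.lower(), set())
--         surviving = [i for i in surviving if i in posting]
--     return [deals[i] for i in surviving]
-- ===== Notes on version B (the rewrite author's own statement) =====
-- stated objective: alternative
-- what changed: Replaces per-deal lowercased-set subset checking with an inverted index (lowercased tag -> set of deal indices) built in one pass, followed by posting-set intersection over the sorted index list and a final gather of deals by index.
import Mathlib
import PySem

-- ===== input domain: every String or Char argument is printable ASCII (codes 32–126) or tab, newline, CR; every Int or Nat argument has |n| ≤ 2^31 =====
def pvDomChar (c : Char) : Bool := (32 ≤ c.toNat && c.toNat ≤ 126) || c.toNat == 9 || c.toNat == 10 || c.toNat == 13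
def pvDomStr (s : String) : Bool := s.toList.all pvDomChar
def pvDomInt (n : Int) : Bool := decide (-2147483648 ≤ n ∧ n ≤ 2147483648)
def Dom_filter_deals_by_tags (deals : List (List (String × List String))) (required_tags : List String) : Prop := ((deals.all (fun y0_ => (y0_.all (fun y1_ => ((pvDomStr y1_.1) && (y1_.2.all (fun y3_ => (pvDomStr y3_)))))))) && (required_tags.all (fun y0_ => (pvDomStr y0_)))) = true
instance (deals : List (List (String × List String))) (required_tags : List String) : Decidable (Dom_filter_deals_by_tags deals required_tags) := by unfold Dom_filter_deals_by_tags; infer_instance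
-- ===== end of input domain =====

-- ===== PORT A =====
-- B replaces per-deal subset tests with an inverted index (tag -> posting set of deal
-- indices) intersected over the index list; alternative decomposition, same results.

-- deal.get("tags", []) (shared construct of both Pythons)
def pvTags (deal : List (String × List String)) : List String :=
  (PySem.Dict.mk deal).getD "tags" []

def filter_deals_by_tags (deals : List (List (String × List String))) (required_tags : List String) : List (List (String × List String)) :=
  let required_set : PySem.Set String := PySem.Set.ofList (required_tags.map PySem.Str.lower)
  deals.foldl (fun filtered deal =>
    let deal_tags : PySem.Set String := PySem.Set.ofList ((pvTags deal).map PySem.Str.lower)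
    if PySem.Set.issubset required_set deal_tags then filtered ++ [deal] else filtered) []

-- ===== PORT B =====
def filter_deals_by_tags_alt (deals : List (List (String × List String))) (required_tags : List String) : List (List (String × List String)) :=
  -- inverted index: lowercased tag -> set of deal indices carrying it
  let index : PySem.Dict String (PySem.Set Int) :=
    (PySem.List.enumerate deals 0).foldl (fun index p =>
      (pvTags p.2).foldl (fun index tag =>
        let t := PySem.Str.lower tag
        let posting := index.getD t PySem.Set.empty
        index.insert t (posting.add p.1)) index) PySem.Dict.empty
  -- intersect posting sets along the (sorted) list of all indices
  let surviving : List Int := required_tags.foldl (fun surviving tag =>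
      let posting := index.getD (PySem.Str.lower tag) PySem.Set.empty
      surviving.filter (fun i => posting.contains i)) (PySem.List.pyRange 0 deals.length 1)
  -- deals[i]: i is always in range, so pyGetD's default is never taken
  surviving.map (fun i => PySem.List.pyGetD deals i [])

-- ===== PRECONDITION & SPEC =====
def Spec_filter_deals_by_tags (deals : List (List (String × List String))) (required_tags : List String) (out : List (List (String × List String))) : Prop := out = filter_deals_by_tags_alt deals required_tags
instance (deals : List (List (String × List String))) (required_tags : List String) (out : List (List (String × List String))) : Decidable (Spec_filter_deals_by_tags deals required_tags out) := by unfold Spec_filter_deals_by_tags; infer_instance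

-- ===== CLAIM (what is proved, stated in full; the proofs are below) =====
def Claim_equal_filter_deals_by_tags : Prop := ∀ (deals : List (List (String × List String))) (required_tags : List String), Dom_filter_deals_by_tags deals required_tags → Spec_filter_deals_by_tags deals required_tags (filter_deals_by_tags deals required_tags)

-- ===== LEMMAS AND PROOFS =====

-- the tag-loop of one deal, seen through a lookup in the resulting index
theorem pv_inner_mem (tags : List String) (d : PySem.Dict String (PySem.Set Int)) (i : Int) (t : String) (x : Int) :
    x ∈ (tags.foldl (fun d tag =>
      d.insert (PySem.Str.lower tag) ((d.getD (PySem.Str.lower tag) PySem.Set.empty).add i)) d).getD t PySem.Set.empty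
    ↔ x ∈ d.getD t PySem.Set.empty ∨ (x = i ∧ t ∈ tags.map PySem.Str.lower) := by
  induction tags generalizing d with
  | nil => simp
  | cons tag rest ih =>
    simp only [List.foldl_cons, List.map_cons, List.mem_cons]
    rw [ih, PySem.Dict.getD_insert]
    split_ifs with ht
    · subst ht
      simp only [PySem.Set.mem_add]
      tauto
    · tauto

-- the whole index-building loop: x is in the posting set of t iff deal x carries tag t
theorem pv_outer_mem (ds : List (List (String × List String))) (s : Int) (d : PySem.Dict String (PySem.Set Int)) (t : String) (x : Int) :
    x ∈ ((PySem.List.enumerate ds s).foldl (fun d p =>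
      (pvTags p.2).foldl (fun d tag =>
        d.insert (PySem.Str.lower tag) ((d.getD (PySem.Str.lower tag) PySem.Set.empty).add p.1)) d) d).getD t PySem.Set.empty
    ↔ x ∈ d.getD t PySem.Set.empty ∨ ∃ (k : Nat) (h : k < ds.length), x = s + k ∧ t ∈ (pvTags ds[k]).map PySem.Str.lower := by
  induction ds generalizing s d with
  | nil => simp [PySem.List.enumerate]
  | cons deal rest ih =>
    have hcons : PySem.List.enumerate (deal :: rest) s = (s, deal) :: PySem.List.enumerate rest (s + 1) := by
      simp [PySem.List.enumerate]
    rw [hcons, List.foldl_cons, ih, pv_inner_mem]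
    constructor
    · rintro ((hd | ⟨hx, ht⟩) | ⟨k, hk, hx, ht⟩)
      · exact Or.inl hd
      · exact Or.inr ⟨0, by simp, by omega, by simpa using ht⟩
      · exact Or.inr ⟨k + 1, by simpa using hk, by push_cast; omega, by simpa using ht⟩
    · rintro (hd | ⟨k, hk, hx, ht⟩)
      · exact Or.inl (Or.inl hd)
      · cases k with
        | zero => exact Or.inl (Or.inr ⟨by omega, by simpa using ht⟩)
        | succ k => exact Or.inr ⟨k, by simpa using hk, by push_cast at hx ⊢; omega, by simpa using ht⟩

-- the intersection loop is one filter by the conjunction of all posting-set tests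
theorem pv_surv_fold (req : List String) (index : PySem.Dict String (PySem.Set Int)) (surv : List Int) :
    req.foldl (fun surviving tag =>
      surviving.filter (fun i => (index.getD (PySem.Str.lower tag) PySem.Set.empty).contains i)) surv
    = surv.filter (fun i => req.all (fun tag => (index.getD (PySem.Str.lower tag) PySem.Set.empty).contains i)) := by
  induction req generalizing surv with
  | nil => simp
  | cons tag rest ih =>
    rw [List.foldl_cons, ih, List.filter_filter]
    exact List.filter_congr (fun i _ => by rw [Bool.and_comm, List.all_cons])

-- gathering the surviving indices of range(len(ds)) is a filter of ds (Nat core)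
theorem pv_range_filter_map_nat {alpha : Type} (ds : List alpha) (d0 : alpha) (p : alpha → Bool) (q : Nat → Bool)
    (h : ∀ (i : Nat) (hi : i < ds.length), q i = p ds[i]) :
    ((List.range ds.length).filter q).map (fun i => ds.getD i d0) = ds.filter p := by
  induction ds using List.reverseRecOn with
  | nil => simp
  | append_singleton xs a ih =>
    have hlen : (xs ++ [a]).length = xs.length + 1 := by simp
    rw [hlen, List.range_succ, List.filter_append, List.map_append, List.filter_append]
    have h1 : ((List.range xs.length).filter q).map (fun i => (xs ++ [a]).getD i d0)
        = ((List.range xs.length).filter q).map (fun i => xs.getD i d0) := by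
      refine List.map_congr_left (fun i hi => ?_)
      have : i < xs.length := by
        have := List.mem_filter.mp hi
        simpa using List.mem_range.mp this.1
      simp [List.getD, List.getElem?_append_left this]
    have h2 : ∀ (i : Nat) (hi : i < xs.length), q i = p xs[i] := by
      intro i hi
      have := h i (by rw [hlen]; omega)
      rwa [List.getElem_append_left hi] at this
    rw [h1, ih h2]
    have hq : q xs.length = p a := by
      have := h xs.length (by rw [hlen]; omega)
      simpa using this
    by_cases hpa : p a = true
    · simp [hq, hpa, List.getD]
    · simp only [Bool.not_eq_true] at hpa
      simp [hq, hpa]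

-- the Int wrapper: pyRange / pyGetD reduce to the Nat core
theorem pv_range_filter_map {alpha : Type} (ds : List alpha) (d0 : alpha) (p : alpha → Bool) (q : Int → Bool)
    (h : ∀ (i : Nat) (hi : i < ds.length), q i = p ds[i]) :
    ((PySem.List.pyRange 0 ds.length 1).filter q).map (fun i => PySem.List.pyGetD ds i d0) = ds.filter p := by
  have : (ds.length : Int) = ((ds.length : Nat) : Int) := rfl
  rw [this, PySem.List.pyRange_zero_natCast, List.filter_map, List.map_map]
  rw [← pv_range_filter_map_nat ds d0 p (fun i => q i) h]
  simp only [Function.comp_def]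
  exact List.map_congr_left (fun i _ => by simp [PySem.List.pyGetD_natCast])

-- pointwise: the posting-set test over all required tags IS A's subset test
theorem pv_pointwise (deals : List (List (String × List String))) (required_tags : List String) (k : Nat) (hk : k < deals.length) :
    required_tags.all (fun tag =>
      (((PySem.List.enumerate deals 0).foldl (fun index p =>
        (pvTags p.2).foldl (fun index tag =>
          index.insert (PySem.Str.lower tag) ((index.getD (PySem.Str.lower tag) PySem.Set.empty).add p.1)) index)
        PySem.Dict.empty).getD (PySem.Str.lower tag) PySem.Set.empty).contains (k : Int))
    = PySem.Set.issubset (PySem.Set.ofList (required_tags.map PySem.Str.lower))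
        (PySem.Set.ofList ((pvTags deals[k]).map PySem.Str.lower)) := by
  rw [Bool.eq_iff_iff]
  rw [PySem.Set.issubset_iff]
  rw [List.all_eq_true]
  constructor
  · intro hall t htmem
    rw [PySem.Set.mem_ofList] at htmem
    obtain ⟨tag, htag, rfl⟩ := List.mem_map.mp htmem
    have := hall tag htag
    rw [PySem.Set.contains_iff, pv_outer_mem] at this
    rcases this with hd | ⟨j, hj, hx, ht⟩
    · simp [PySem.Dict.getD_empty, PySem.Set.empty_eq] at hd
    · have hjk : j = k := by omega
      subst hjk
      rw [PySem.Set.mem_ofList]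
      exact ht
  · intro hsub tag htag
    rw [PySem.Set.contains_iff, pv_outer_mem]
    refine Or.inr ⟨k, hk, by omega, ?_⟩
    have := hsub (PySem.Str.lower tag) (by rw [PySem.Set.mem_ofList]; exact List.mem_map_of_mem htag)
    rwa [PySem.Set.mem_ofList] at this

-- ===== VERDICT (by name: the statement is the Claim_ definition above) =====
theorem filter_deals_by_tags_spec : Claim_equal_filter_deals_by_tags := by
  intro deals required_tags _
  unfold Spec_filter_deals_by_tags
  show filter_deals_by_tags deals required_tags = filter_deals_by_tags_alt deals required_tags
  simp only [filter_deals_by_tags, filter_deals_by_tags_alt]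
  rw [PySem.List.foldl_append_if
    (fun deal => PySem.Set.issubset (PySem.Set.ofList (required_tags.map PySem.Str.lower))
      (PySem.Set.ofList ((pvTags deal).map PySem.Str.lower))) (fun deal => deal) deals []]
  rw [pv_surv_fold]
  rw [pv_range_filter_map deals []
    (fun deal => PySem.Set.issubset (PySem.Set.ofList (required_tags.map PySem.Str.lower))
      (PySem.Set.ofList ((pvTags deal).map PySem.Str.lower)))
    _ (fun i hi => pv_pointwise deals required_tags i hi)]
  simp
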